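-- pv_equiv track=rewrite | github.com/NyanNyanGringo/NukeX-VP_MyLittleHelpers | VP_LittleHelpers/little_helpers/vp_little_helpers/osHelpers.py | add_arrow_before_spaces
-- ===== SOURCE A (Python) =====
-- def add_arrow_before_spaces(string):
--
--     result = ""
--
--     for x in range(len(string)):
--         if (x < len(string)-1) and (string[x+1] == " "):
--             result += string[x] + "^"
--         else:
--             result += string[x]
--
--     return result
-- ===== SOURCE B (Python) =====
-- def add_arrow_before_spaces(string):
--     t = string.replace(' ', '^ ')
--     return t[1:] if string.startswith(' ') else t
-- ===== Notes on version B (the rewrite author's own statement) =====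
-- stated objective: idiomatic
-- what changed: Replaces the per-character index loop with a global str.replace that carets every space, then drops the one spurious leading caret when the string begins with a space.
import Mathlib
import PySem

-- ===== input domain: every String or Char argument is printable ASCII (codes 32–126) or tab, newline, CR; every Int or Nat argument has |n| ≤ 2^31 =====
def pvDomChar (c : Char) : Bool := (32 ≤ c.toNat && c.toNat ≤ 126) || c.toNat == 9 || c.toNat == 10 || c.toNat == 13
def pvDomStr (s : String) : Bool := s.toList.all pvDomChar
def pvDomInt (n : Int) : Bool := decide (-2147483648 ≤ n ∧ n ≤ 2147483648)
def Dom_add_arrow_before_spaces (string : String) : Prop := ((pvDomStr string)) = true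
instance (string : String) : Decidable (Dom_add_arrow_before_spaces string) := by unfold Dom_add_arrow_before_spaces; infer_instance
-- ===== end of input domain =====

-- B replaces A's per-index loop by a global str.replace that carets every space, then
-- drops the spurious leading caret when the string begins with a space (idiomatic staged passes).


-- ===== PORT A =====
-- A: loop x over range(len(string)); string[x] / string[x+1] are accessed only at
-- in-range indices (the lookahead is guarded by x < len-1), so List.getD is exact here.
def add_arrow_before_spaces (string : String) : String :=
  let cs := string.toList
  String.ofList ((List.range cs.length).foldl
    (fun result x =>
      if x < cs.length - 1 ∧ cs.getD (x+1) ' ' = ' ' then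
        result ++ [cs.getD x ' ', '^']
      else
        result ++ [cs.getD x ' ']) [])

-- ===== PORT B =====
-- B: t = string.replace(' ', '^ '); return t[1:] if string.startswith(' ') else t
def add_arrow_before_spaces_alt (string : String) : String :=
  let t := PySem.Str.replace string " " "^ "
  if PySem.Str.startswith string " " then PySem.Str.slice t (some 1) none else t

-- ===== PRECONDITION & SPEC =====
def Spec_add_arrow_before_spaces (string : String) (out : String) : Prop := out = add_arrow_before_spaces_alt string
instance (string : String) (out : String) : Decidable (Spec_add_arrow_before_spaces string out) := by unfold Spec_add_arrow_before_spaces; infer_instance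

-- ===== CLAIM (what is proved, stated in full; the proofs are below) =====
def Claim_equal_add_arrow_before_spaces : Prop := ∀ (string : String), Dom_add_arrow_before_spaces string → Spec_add_arrow_before_spaces string (add_arrow_before_spaces string)

-- ===== LEMMAS AND PROOFS =====

/-- A's per-index piece. -/
def pieceA (cs : List Char) (x : Nat) : List Char :=
  if x < cs.length - 1 ∧ cs.getD (x+1) ' ' = ' ' then [cs.getD x ' ', '^'] else [cs.getD x ' ']

/-- Reference recursion A's loop is reduced to: caret after every char followed by a space. -/
def rec2 : List Char → List Char
  | [] => []
  | [c] => [c]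
  | c :: d :: t => (if d = ' ' then [c, '^'] else [c]) ++ rec2 (d :: t)

/-- What replace(' ', '^ ') does: caret before EVERY space. -/
def caretAll : List Char → List Char
  | [] => []
  | c :: t => if c = ' ' then '^' :: ' ' :: caretAll t else c :: caretAll t

theorem foldl_append_f {α β : Type} (f : α → List β) :
    ∀ (l : List α) (acc : List β),
      l.foldl (fun r x => r ++ f x) acc = acc ++ l.flatMap f := by
  intro l
  induction l with
  | nil => intro acc; simp
  | cons a t ih => intro acc; simp [List.foldl, ih, List.flatMap_cons]

theorem pieceA_succ (c : Char) (rest : List Char) (x : Nat) :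
    pieceA (c :: rest) (x + 1) = pieceA rest x := by
  have h2 : (x + 1 < rest.length) ↔ (x < rest.length - 1) := by omega
  simp [pieceA, h2]

theorem flatMap_range_pieceA : ∀ (cs : List Char),
    (List.range cs.length).flatMap (pieceA cs) = rec2 cs := by
  intro cs
  induction cs with
  | nil => simp [rec2]
  | cons c rest ih =>
    rw [List.length_cons, List.range_succ_eq_map, List.flatMap_cons, List.flatMap_map]
    have hcong : (List.range rest.length).flatMap (fun x => pieceA (c :: rest) (x + 1))
        = (List.range rest.length).flatMap (pieceA rest) := by
      apply List.flatMap_congr <;> intro x _ <;> exact pieceA_succ c rest x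
    rw [hcong, ih]
    cases rest with
    | nil => simp [pieceA, rec2]
    | cons d t =>
      by_cases hd : d = ' ' <;> simp [pieceA, rec2, hd]

/-- replace.go with old = " ", new = "^ " computes caretAll (fuel ≥ length suffices). -/
theorem go_caretAll : ∀ (fuel : Nat) (l acc : List Char), l.length ≤ fuel →
    PySem.Chars.replace.go [' '] ['^', ' '] fuel l acc = acc.reverse ++ caretAll l := by
  intro fuel
  induction fuel with
  | zero =>
    intro l acc h
    have : l = [] := List.eq_nil_of_length_eq_zero (Nat.le_zero.mp h)
    subst this; simp [PySem.Chars.replace.go, caretAll]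
  | succ n ih =>
    intro l acc h
    cases l with
    | nil => simp [PySem.Chars.replace.go, caretAll]
    | cons c t =>
      by_cases hc : c = ' '
      · subst hc
        have hpre : List.isPrefixOf [' '] (' ' :: t) = true := by
          simp [List.isPrefixOf]
        simp only [PySem.Chars.replace.go, hpre]
        rw [if_pos trivial]
        have hdrop : List.drop [' '].length (' ' :: t) = t := rfl
        have hrev : ((['^', ' '].reverse ++ acc) : List Char) = ' ' :: '^' :: acc := rfl
        rw [hdrop, hrev, ih t (' ' :: '^' :: acc) (by simp at h; omega)]
        simp [caretAll]
      · have hpre : List.isPrefixOf [' '] (c :: t) = false := by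
          simp [List.isPrefixOf]; exact fun h' => hc h'.symm
        simp only [PySem.Chars.replace.go, hpre]
        rw [if_neg (by simp [hpre])]
        rw [ih t (c :: acc) (by simp at h; omega)]
        simp [caretAll, hc]

theorem replace_eq_caretAll (cs : List Char) :
    PySem.Chars.replace cs [' '] ['^', ' '] = caretAll cs := by
  have : ([' '] : List Char).isEmpty = false := rfl
  rw [PySem.Chars.replace]
  simp only [this, Bool.false_eq_true, if_false]
  exact go_caretAll cs.length cs [] (le_refl _)

theorem cons_caretAll : ∀ (t : List Char) (c : Char), c :: caretAll t = rec2 (c :: t) := by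
  intro t
  induction t with
  | nil => intro c; simp [caretAll, rec2]
  | cons d t' ih =>
    intro c
    by_cases hd : d = ' ' <;> simp [caretAll, rec2, hd, ← ih]

theorem caretAll_rec2 : ∀ (cs : List Char),
    caretAll cs = if cs.head? = some ' ' then '^' :: rec2 cs else rec2 cs := by
  intro cs
  cases cs with
  | nil => simp [caretAll, rec2]
  | cons c t =>
    by_cases hc : c = ' '
    · subst hc
      simp only [List.head?_cons]
      rw [if_pos trivial]
      show caretAll (' ' :: t) = '^' :: rec2 (' ' :: t)
      simp [caretAll, ← cons_caretAll t ' ']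
    · simp only [List.head?_cons, Option.some.injEq, hc, if_false]
      show caretAll (c :: t) = rec2 (c :: t)
      simp [caretAll, hc, ← cons_caretAll t c]

-- ===== VERDICT (by name: the statement is the Claim_ definition above) =====
theorem add_arrow_before_spaces_spec : Claim_equal_add_arrow_before_spaces := by
  intro s _
  unfold Spec_add_arrow_before_spaces
  have hA : add_arrow_before_spaces s = String.ofList (rec2 s.toList) := by
    show String.ofList ((List.range s.toList.length).foldl
        (fun result x =>
          if x < s.toList.length - 1 ∧ s.toList.getD (x+1) ' ' = ' ' then
            result ++ [s.toList.getD x ' ', '^']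
          else
            result ++ [s.toList.getD x ' ']) []) = String.ofList (rec2 s.toList)
    have hA0 := foldl_append_f (pieceA s.toList) (List.range s.toList.length) []
    simp only [List.nil_append] at hA0
    rw [show (fun (result : List Char) x =>
        if x < s.toList.length - 1 ∧ s.toList.getD (x+1) ' ' = ' ' then
          result ++ [s.toList.getD x ' ', '^']
        else
          result ++ [s.toList.getD x ' ']) = fun result x => result ++ pieceA s.toList x from by
      funext r x; unfold pieceA; split_ifs <;> rfl]
    rw [hA0, flatMap_range_pieceA]
  rw [hA]
  have hrep : (PySem.Str.replace s " " "^ ").toList = caretAll s.toList := by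
    rw [PySem.Str.toList_replace]
    show PySem.Chars.replace s.toList [' '] ['^', ' '] = caretAll s.toList
    exact replace_eq_caretAll s.toList
  unfold add_arrow_before_spaces_alt
  by_cases hs : s.toList.head? = some ' '
  · have hsw : PySem.Str.startswith s " " = true := by
      rw [PySem.Str.startswith]
      rw [PySem.Chars.startswith_iff]
      show ([' '] : List Char) <+: s.toList
      cases hl : s.toList with
      | nil => simp [hl] at hs
      | cons c t =>
        rw [hl] at hs; simp at hs
        exact ⟨t, by simp [hs]⟩
    simp only [hsw, if_true]
    apply String.toList_injective
    rw [PySem.Str.toList_slice]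
    simp only [PySem.Chars.slice_eq_listSlice]
    rw [hrep, caretAll_rec2, if_pos hs, PySem.List.slice_from_one]
    simp [String.toList_ofList]
  · have hsw : PySem.Str.startswith s " " = false := by
      rw [PySem.Str.startswith]
      apply Bool.eq_false_iff.mpr
      intro hcon
      rw [PySem.Chars.startswith_iff] at hcon
      obtain ⟨t, ht⟩ := hcon
      rw [show (" " : String).toList = [' '] from rfl] at ht
      rw [← ht] at hs; simp at hs
    simp only [hsw, if_false, Bool.false_eq_true]
    apply String.toList_injective
    rw [hrep, caretAll_rec2, if_neg hs, String.toList_ofList]
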